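-- pv_equiv track=rewrite | github.com/lynever/prac_programmars | 프로그래머스/unrated/181932. 코드 처리하기/코드 처리하기.py | solution
-- ===== SOURCE A (Python) =====
-- def solution(code):
--     answer = ''
--     state = 0
--     for idx, val in enumerate(code):
--         if state == 0:
--             if val == '1':
--                 state = 1
--             elif idx % 2 == 0:
--                 answer += val
--         elif state == 1:
--             if val == '1':
--                 state = 0
--             elif idx % 2 == 1:
--                 answer += val
--     return answer if len(answer) != 0 else 'EMPTY'
-- ===== SOURCE B (Python) =====
-- def solution(code):
--     # Stateless positional criterion: keep code[i] iff it is not '1' and the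
--     # number of '1's in the prefix code[:i] has the same parity as i.
--     kept = [c for i, c in enumerate(code)
--             if c != '1' and sum(d == '1' for d in code[:i]) % 2 == i % 2]
--     return ''.join(kept) or 'EMPTY'
-- ===== Notes on version B (the rewrite author's own statement) =====
-- stated objective: alternative
-- what changed: Drops A's incremental toggling state machine entirely: B keeps each character by a stateless positional criterion, recounting the '1's in the prefix code[:i] for every index and comparing that count's parity with i's parity, then joins the survivors.
import Mathlib
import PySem

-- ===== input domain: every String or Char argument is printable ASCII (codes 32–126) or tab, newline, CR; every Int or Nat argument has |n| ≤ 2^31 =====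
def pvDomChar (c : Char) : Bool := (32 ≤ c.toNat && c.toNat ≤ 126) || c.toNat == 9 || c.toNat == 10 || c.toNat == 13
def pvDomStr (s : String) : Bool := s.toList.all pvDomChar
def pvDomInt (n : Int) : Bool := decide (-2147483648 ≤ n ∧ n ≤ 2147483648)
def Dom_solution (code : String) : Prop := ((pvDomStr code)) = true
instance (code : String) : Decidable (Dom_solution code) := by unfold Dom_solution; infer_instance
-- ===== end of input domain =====

-- B replaces A's toggling state machine with a stateless per-index criterion that recounts the '1's in each prefix (alternative decomposition; B is quadratic, A linear).


-- ===== PORT A =====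
-- the for-loop of A: state (answer as char list, state), iterating enumerate(code)
def solGoA : List (Int × Char) → Int → List Char → List Char
  | [], _, answer => answer
  | (idx, val) :: rest, state, answer =>
    if state == 0 then
      if val == '1' then solGoA rest 1 answer
      else if idx % 2 == 0 then solGoA rest state (answer ++ [val])
      else solGoA rest state answer
    else if state == 1 then
      if val == '1' then solGoA rest 0 answer
      else if idx % 2 == 1 then solGoA rest state (answer ++ [val])
      else solGoA rest state answer
    else solGoA rest state answer

def solution (code : String) : String :=
  let answer := solGoA (PySem.List.enumerate code.toList 0) 0 []
  if answer ≠ [] then String.ofList answer else "EMPTY"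

-- ===== PORT B =====
-- sum(d == '1' for d in s)
def sumOnes (s : List Char) : Int :=
  s.foldl (fun n d => n + (if d == '1' then 1 else 0)) 0

def solution_alt (code : String) : String :=
  let l := code.toList
  let kept := ((PySem.List.enumerate l 0).filter
      (fun p => p.2 != '1' && sumOnes (PySem.List.slice l none (some p.1)) % 2 == p.1 % 2)).map
    (fun p => p.2)
  if kept ≠ [] then String.ofList kept else "EMPTY"

-- ===== PRECONDITION & SPEC =====
def Spec_solution (code : String) (out : String) : Prop := out = solution_alt code
instance (code : String) (out : String) : Decidable (Spec_solution code out) := by unfold Spec_solution; infer_instance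

-- ===== CLAIM (what is proved, stated in full; the proofs are below) =====
def Claim_equal_solution : Prop := ∀ (code : String), Dom_solution code → Spec_solution code (solution code)

-- ===== LEMMAS AND PROOFS =====

-- reference selection function both ports are reduced to
def sel : List Char → Int → Int → List Char
  | [], _, _ => []
  | c :: r, idx, s =>
    if c = '1' then sel r (idx + 1) (1 - s)
    else if idx % 2 = s then c :: sel r (idx + 1) s
    else sel r (idx + 1) s

theorem solGoA_eq_sel (l : List Char) : ∀ (idx s : Int) (ans : List Char),
    s = 0 ∨ s = 1 → solGoA (PySem.List.enumerate l idx) s ans = ans ++ sel l idx s := by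
  induction l with
  | nil => intro idx s ans _; simp [PySem.List.enumerate_nil, solGoA, sel]
  | cons c r ih =>
    intro idx s ans hs
    rw [PySem.List.enumerate_cons]
    have ih0 := fun idx ans => ih idx 0 ans (Or.inl rfl)
    have ih1 := fun idx ans => ih idx 1 ans (Or.inr rfl)
    rcases Int.emod_two_eq_zero_or_one idx with hm | hm <;>
      rcases hs with h | h <;> subst h <;> by_cases hc : c = '1' <;>
      simp_all [solGoA, sel] <;>
      (try exact (apply_ite (fun l => ans ++ l) _ _ _).symm)

theorem sumOnes_append_singleton (s : List Char) (c : Char) :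
    sumOnes (s ++ [c]) = sumOnes s + (if c = '1' then 1 else 0) := by
  simp [sumOnes]

theorem sumOnes_nonneg (s : List Char) : 0 ≤ sumOnes s := by
  induction s using List.reverseRecOn with
  | nil => simp [sumOnes]
  | append_singleton r c ih =>
    rw [sumOnes_append_singleton]; split_ifs <;> omega

-- B's filter pass over the suffix r of L (= pre ++ r) equals sel, where the
-- state is the parity of '1's in the prefix pre.
theorem filt_eq_sel (L : List Char) : ∀ (r pre : List Char), L = pre ++ r →
    ((PySem.List.enumerate r ((pre.length : Int))).filter
        (fun p => p.2 != '1' && sumOnes (PySem.List.slice L none (some p.1)) % 2 == p.1 % 2)).map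
      (fun p => p.2)
      = sel r pre.length (sumOnes pre % 2) := by
  intro r
  induction r with
  | nil => intro pre _; simp [PySem.List.enumerate_nil, sel]
  | cons c r ih =>
    intro pre hL
    rw [PySem.List.enumerate_cons]
    have hslice : PySem.List.slice L none (some ((pre.length : Int))) = pre := by
      rw [PySem.List.slice_to_natCast, hL, List.take_left]
    have hpre : ((pre ++ [c]).length : Int) = (pre.length : Int) + 1 := by
      simp
    have ih' := ih (pre ++ [c]) (by simp [hL])
    rw [hpre] at ih'
    have hnn := sumOnes_nonneg pre
    by_cases hc : c = '1'
    · subst hc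
      have hpar : sumOnes (pre ++ ['1']) % 2 = 1 - sumOnes pre % 2 := by
        rw [sumOnes_append_singleton]
        simp
        omega
      rw [hpar] at ih'
      simp [sel, ih']
    · have hpar : sumOnes (pre ++ [c]) % 2 = sumOnes pre % 2 := by
        rw [sumOnes_append_singleton]; simp [hc]
      rw [hpar] at ih'
      by_cases hm : (pre.length : Int) % 2 = sumOnes pre % 2
      · simp [sel, hc, hm, hslice, ih']
      · have hm' : ¬ (sumOnes pre % 2 = (pre.length : Int) % 2) := fun h => hm h.symm
        simp [sel, hc, hm, hm', hslice, ih']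

theorem solution_eq (code : String) : solution code = solution_alt code := by
  have h := filt_eq_sel code.toList code.toList [] (by simp)
  simp only [List.length_nil, Int.natCast_zero] at h
  simp only [solution, solution_alt, solGoA_eq_sel code.toList 0 0 [] (Or.inl rfl),
    List.nil_append, h]
  norm_num [sumOnes]

-- ===== VERDICT (by name: the statement is the Claim_ definition above) =====
theorem solution_spec : Claim_equal_solution := by
  intro code _
  unfold Spec_solution
  exact solution_eq code
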